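-- pv_equiv track=rewrite | github.com/odisme0804/word2vec | Mylibs/Tools.py | user_checked
-- ===== SOURCE A (Python) =====
-- def user_checked(tr_list):
--
--     user_checked_freq = {}
--     for i in tr_list:
--         if i[0] not in user_checked_freq:
--             user_checked_freq[i[0]] = {}
--
--         if i[1] not in user_checked_freq[i[0]]:
--             user_checked_freq[i[0]][i[1]] = 1
--         else:
--             user_checked_freq[i[0]][i[1]] = user_checked_freq[i[0]][i[1]]+1
--
--     return user_checked_freq
-- ===== SOURCE B (Python) =====
-- def user_checked(tr_list):
--     # pass 1: flat (user, item) pair counts, in first-occurrence order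
--     pair_freq = {}
--     for i in tr_list:
--         p = (i[0], i[1])
--         pair_freq[p] = pair_freq.get(p, 0) + 1
--     # pass 2: reshape the flat counts into the nested user -> item -> count dict
--     result = {}
--     for (u, v), n in pair_freq.items():
--         result.setdefault(u, {})[v] = n
--     return result
-- ===== Notes on version B (the rewrite author's own statement) =====
-- stated objective: alternative
-- what changed: A builds the nested user->item->count dict in one interleaved loop with per-element membership tests on both levels; B first counts flat (user,item) pairs into a single dict in one pass, then reshapes those counts into the nested dict in a second pass over the distinct pairs.
import Mathlib
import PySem

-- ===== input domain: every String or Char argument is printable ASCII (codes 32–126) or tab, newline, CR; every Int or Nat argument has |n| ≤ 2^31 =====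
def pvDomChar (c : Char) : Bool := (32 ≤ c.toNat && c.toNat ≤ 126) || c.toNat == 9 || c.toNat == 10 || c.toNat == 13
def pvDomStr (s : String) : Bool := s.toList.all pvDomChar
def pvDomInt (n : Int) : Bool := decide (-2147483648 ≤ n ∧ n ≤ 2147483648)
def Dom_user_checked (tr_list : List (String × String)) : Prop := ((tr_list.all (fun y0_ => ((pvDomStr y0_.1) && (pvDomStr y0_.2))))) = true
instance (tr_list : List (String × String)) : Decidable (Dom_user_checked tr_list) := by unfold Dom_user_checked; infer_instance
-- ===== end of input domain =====

-- B replaces A's single interleaved nested-update loop by two passes: a flat (user,item) pair count, then a reshape into the nested dict (alternative decomposition, same cost).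

-- ===== PORT A =====
-- the body of A's loop: setdefault-style outer entry, then conditional inner set/increment
def aStep (d : PySem.Dict String (PySem.Dict String Int)) (i : String × String) :
    PySem.Dict String (PySem.Dict String Int) :=
  let d := if d.contains i.1 then d else d.insert i.1 PySem.Dict.empty   -- if i[0] not in …: …[i[0]] = {}
  let inner := d.getD i.1 PySem.Dict.empty                               -- …[i[0]] (key present: getD is exact)
  if !(inner.contains i.2) then
    d.insert i.1 (inner.insert i.2 1)                                    -- …[i[0]][i[1]] = 1
  else
    d.insert i.1 (inner.insert i.2 (inner.getD i.2 0 + 1))               -- …[i[0]][i[1]] = …+1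

def user_checked (tr_list : List (String × String)) : List (String × List (String × Int)) :=
  ((tr_list.foldl aStep PySem.Dict.empty).items).map (fun p => (p.1, p.2.items))

-- ===== PORT B =====
-- pass 2 body: result.setdefault(u, {})[v] = n  (= Dict.modify, 'd[k] = f(d.get(k, dflt))')
def bStep (r : PySem.Dict String (PySem.Dict String Int)) (q : (String × String) × Int) :
    PySem.Dict String (PySem.Dict String Int) :=
  r.modify q.1.1 PySem.Dict.empty (fun inner => inner.insert q.1.2 q.2)

def user_checked_alt (tr_list : List (String × String)) : List (String × List (String × Int)) :=
  -- pass 1: flat pair counts   pair_freq[p] = pair_freq.get(p, 0) + 1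
  let pair_freq := tr_list.foldl (fun d p => d.insert p (d.getD p 0 + 1)) PySem.Dict.empty
  -- pass 2: reshape into the nested dict
  ((pair_freq.items.foldl bStep PySem.Dict.empty).items).map (fun p => (p.1, p.2.items))

-- ===== PRECONDITION & SPEC =====
def Spec_user_checked (tr_list : List (String × String)) (out : List (String × List (String × Int))) : Prop := out = user_checked_alt tr_list
instance (tr_list : List (String × String)) (out : List (String × List (String × Int))) : Decidable (Spec_user_checked tr_list out) := by unfold Spec_user_checked; infer_instance

-- ===== CLAIM (what is proved, stated in full; the proofs are below) =====
def Claim_equal_user_checked : Prop := ∀ (tr_list : List (String × String)), Dom_user_checked tr_list → Spec_user_checked tr_list (user_checked tr_list)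

-- ===== LEMMAS AND PROOFS =====

def shapeInner (l : List (String × String)) (u : String) : PySem.Dict String Int :=
  PySem.Dict.mk (((PySem.List.dedup l).filter (fun p => p.1 == u)).map (fun p => (p.2, (l.count p : Int))))

def shapeDict (l : List (String × String)) : PySem.Dict String (PySem.Dict String Int) :=
  PySem.Dict.mk ((PySem.List.dedup (l.map (·.1))).map (fun u => (u, shapeInner l u)))

theorem contains_mk_map {α κ ν : Type} [BEq κ] [LawfulBEq κ] (L : List α) (k : α → κ) (f : α → ν) (x : κ) :
    (PySem.Dict.mk (L.map fun a => (k a, f a))).contains x = true ↔ ∃ a ∈ L, k a = x := by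
  simp [PySem.Dict.contains, List.any_map, List.any_eq_true, Function.comp]

theorem getD_mk_map {α κ ν : Type} [BEq κ] [LawfulBEq κ] (L : List α) (k : α → κ) (f : α → ν)
    (hnd : (L.map k).Nodup) (a0 : α) (ha0 : a0 ∈ L) (d0 : ν) :
    (PySem.Dict.mk (L.map fun a => (k a, f a))).getD (k a0) d0 = f a0 := by
  induction L with
  | nil => simp at ha0
  | cons b L ih =>
    simp only [List.map_cons] at hnd ⊢
    rw [PySem.Dict.getD, PySem.Dict.get?_mk_cons]
    rcases List.mem_cons.mp ha0 with h | h
    · subst h; simp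
    · have hne : (k b == k a0) = false := by
        simp only [List.nodup_cons] at hnd
        exact beq_eq_false_iff_ne.mpr (fun he => hnd.1 (he ▸ List.mem_map_of_mem h))
      rw [hne]
      simp only [Bool.false_eq_true, if_false]
      exact ih (by simp only [List.nodup_cons] at hnd; exact hnd.2) h

theorem insert_mk_map {α κ ν : Type} [BEq κ] [LawfulBEq κ] [DecidableEq α] (L : List α) (k : α → κ) (f : α → ν)
    (hnd : (L.map k).Nodup) (a0 : α) (ha0 : a0 ∈ L) (w : ν) :
    (PySem.Dict.mk (L.map fun a => (k a, f a))).insert (k a0) w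
      = PySem.Dict.mk (L.map fun a => (k a, if a = a0 then w else f a)) := by
  have hc : (PySem.Dict.mk (L.map fun a => (k a, f a))).contains (k a0) = true :=
    (contains_mk_map L k f (k a0)).mpr ⟨a0, ha0, rfl⟩
  apply PySem.Dict.ext
  rw [PySem.Dict.items_insert_of_contains _ _ hc]
  simp only [List.map_map]
  apply List.map_congr_left
  intro a ha
  by_cases h : a = a0
  · subst h; simp
  · have : (k a == k a0) = false :=
      beq_eq_false_iff_ne.mpr (fun he => h (List.inj_on_of_nodup_map hnd ha ha0 he))
    simp [Function.comp, this, h]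

theorem dedup_append_singleton {α : Type} [BEq α] [LawfulBEq α] (l : List α) (a : α) :
    PySem.List.dedup (l ++ [a]) = if a ∈ l then PySem.List.dedup l else PySem.List.dedup l ++ [a] := by
  rw [PySem.List.dedup, PySem.Set.ofList_append, PySem.Set.update_cons, PySem.Set.update_nil]
  rw [PySem.Set.add]
  by_cases h : a ∈ l
  · rw [if_pos, if_pos h]
    · rfl
    · exact List.elem_eq_true_of_mem (((PySem.List.mem_dedup _ _)).mpr h)
  · rw [if_neg, if_neg h]
    · rfl
    · intro hc
      exact h (((PySem.List.mem_dedup _ _)).mp (List.mem_of_elem_eq_true hc))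

-- ===== specialized shape facts =====
theorem outer_nodup (l : List (String × String)) :
    ((PySem.List.dedup (l.map (·.1))).map (fun u => u)).Nodup := by
  simpa using PySem.List.nodup_dedup (l.map (·.1))

theorem shape_contains (l : List (String × String)) (u : String) :
    (shapeDict l).contains u = true ↔ u ∈ l.map (·.1) := by
  rw [shapeDict]
  rw [show (fun u => (u, shapeInner l u)) = (fun u => ((fun (w : String) => w) u, shapeInner l u)) from rfl]
  rw [contains_mk_map _ (fun w => w) (shapeInner l) u]
  constructor
  · rintro ⟨a, ha, rfl⟩; exact (PySem.List.mem_dedup _ _).mp ha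
  · intro h; exact ⟨u, (PySem.List.mem_dedup _ _).mpr h, rfl⟩

theorem shape_getD (l : List (String × String)) (u : String) (hu : u ∈ l.map (·.1)) :
    (shapeDict l).getD u PySem.Dict.empty = shapeInner l u := by
  have := getD_mk_map (PySem.List.dedup (l.map (·.1))) (fun w => w) (shapeInner l)
    (outer_nodup l) u ((PySem.List.mem_dedup _ _).mpr hu) PySem.Dict.empty
  exact this

theorem inner_nodup (l : List (String × String)) (u : String) :
    (((PySem.List.dedup l).filter (fun p => p.1 == u)).map (fun p => p.2)).Nodup := by
  apply List.Nodup.map_on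
  · intro p hp q hq he
    have hp1 : p.1 = u := by simpa using (List.of_mem_filter hp)
    have hq1 : q.1 = u := by simpa using (List.of_mem_filter hq)
    exact Prod.ext (hp1.trans hq1.symm) he
  · exact (PySem.List.nodup_dedup l).filter _

theorem inner_contains (l : List (String × String)) (u v : String) :
    (shapeInner l u).contains v = true ↔ (u, v) ∈ l := by
  rw [shapeInner]
  rw [contains_mk_map _ (fun p => p.2) (fun p => (l.count p : Int)) v]
  constructor
  · rintro ⟨⟨p1, p2⟩, hp, rfl⟩
    have h1 : p1 = u := by simpa using (List.of_mem_filter hp)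
    have h2 : (p1, p2) ∈ l := (PySem.List.mem_dedup _ _).mp (List.mem_of_mem_filter hp)
    exact h1 ▸ h2
  · intro h
    exact ⟨(u, v), List.mem_filter.mpr ⟨(PySem.List.mem_dedup _ _).mpr h, by simp⟩, rfl⟩

theorem inner_getD (l : List (String × String)) (u v : String) (h : (u, v) ∈ l) :
    (shapeInner l u).getD v 0 = (l.count (u, v) : Int) := by
  have := getD_mk_map ((PySem.List.dedup l).filter (fun p => p.1 == u)) (fun p => p.2)
    (fun p => (l.count p : Int)) (inner_nodup l u) (u, v)
    (List.mem_filter.mpr ⟨(PySem.List.mem_dedup _ _).mpr h, by simp⟩) 0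
  exact this

-- stability of shapeInner under appending a pair with a different user
theorem shapeInner_ne (l : List (String × String)) (x : String × String) (u' : String) (h : u' ≠ x.1) :
    shapeInner (l ++ [x]) u' = shapeInner l u' := by
  rw [shapeInner, shapeInner, dedup_append_singleton]
  have hfe : ∀ (t : List (String × String)), (t ++ [x]).filter (fun p => p.1 == u') = t.filter (fun p => p.1 == u') := by
    intro t
    rw [List.filter_append]
    simp [show (x.1 == u') = false from beq_eq_false_iff_ne.mpr (fun he => h he.symm)]
  have hcong : ∀ (t : List (String × String)),
      (t.filter (fun p => p.1 == u')).map (fun p => (p.2, ((l ++ [x]).count p : Int)))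
        = (t.filter (fun p => p.1 == u')).map (fun p => (p.2, (l.count p : Int))) := by
    intro t
    apply List.map_congr_left
    intro p hp
    have hp1 : p.1 = u' := by simpa using List.of_mem_filter hp
    have hpx : p ≠ x := fun he => h (he ▸ hp1 ▸ rfl)
    simp [List.count_append, List.count_singleton, Ne.symm hpx]
  by_cases hm : x ∈ l
  · rw [if_pos hm, hcong]
  · rw [if_neg hm, hfe, hcong]

theorem outer_insert (l : List (String × String)) (u : String) (hu : u ∈ l.map (·.1))
    (X : PySem.Dict String Int) :
    (shapeDict l).insert u X
      = PySem.Dict.mk ((PySem.List.dedup (l.map (·.1))).map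
          (fun u' => (u', if u' = u then X else shapeInner l u'))) := by
  rw [shapeDict]
  have := insert_mk_map (PySem.List.dedup (l.map (·.1))) (fun w => w) (shapeInner l)
    (outer_nodup l) u ((PySem.List.mem_dedup _ _).mpr hu) X
  exact this

theorem aStep_shape (l : List (String × String)) (x : String × String) :
    aStep (shapeDict l) x = shapeDict (l ++ [x]) := by
  obtain ⟨u, v⟩ := x
  by_cases hu : u ∈ l.map (·.1)
  · have hcu : (shapeDict l).contains (u, v).1 = true := (shape_contains l u).mpr hu
    rw [aStep]
    simp only [hcu, if_true, reduceIte]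
    rw [shape_getD l u hu]
    by_cases hv : (u, v) ∈ l
    · have hcv : (shapeInner l u).contains (u, v).2 = true := (inner_contains l u v).mpr hv
      simp only [hcv, Bool.not_true, Bool.false_eq_true, if_false]
      rw [inner_getD l u v hv]
      have hins : (shapeInner l u).insert v ((l.count (u, v) : Int) + 1)
          = PySem.Dict.mk (((PySem.List.dedup l).filter (fun p => p.1 == u)).map
              (fun p => (p.2, if p = (u, v) then (l.count (u, v) : Int) + 1 else (l.count p : Int)))) := by
        rw [shapeInner]
        exact insert_mk_map _ (fun p => p.2) _ (inner_nodup l u) (u, v)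
          (List.mem_filter.mpr ⟨(PySem.List.mem_dedup _ _).mpr hv, by simp⟩) _
      rw [hins, outer_insert l u hu]
      rw [shapeDict, List.map_append, List.map_singleton]
      rw [dedup_append_singleton _ u, if_pos hu]
      congr 1
      apply List.map_congr_left
      intro u' hu'
      by_cases h : u' = u
      · subst h
        rw [if_pos rfl]
        congr 1
        rw [shapeInner, dedup_append_singleton _ (u', v), if_pos hv]
        apply congrArg
        apply List.map_congr_left
        intro p hp
        by_cases hpx : p = (u', v)
        · subst hpx
          simp [List.count_append]
        · simp [List.count_append, hpx, Ne.symm hpx]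
      · rw [if_neg h, shapeInner_ne l (u, v) u' h]
    · have hcv : (shapeInner l u).contains (u, v).2 = false := by
        rw [← Bool.not_eq_true]; exact fun hc => hv ((inner_contains l u v).mp hc)
      simp only [hcv, Bool.not_false, if_true, reduceIte]
      have hcnt : l.count (u, v) = 0 := List.count_eq_zero.mpr hv
      have hins : (shapeInner l u).insert (u, v).2 1
          = PySem.Dict.mk ((((PySem.List.dedup l).filter (fun p => p.1 == u)).map
              (fun p => (p.2, (l.count p : Int)))) ++ [(v, 1)]) := by
        apply PySem.Dict.ext
        rw [PySem.Dict.items_insert_of_not_contains _ _ hcv]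
        rfl
      rw [hins, outer_insert l u hu]
      rw [shapeDict, List.map_append, List.map_singleton]
      rw [dedup_append_singleton _ u, if_pos hu]
      congr 1
      apply List.map_congr_left
      intro u' hu'
      by_cases h : u' = u
      · subst h
        rw [if_pos rfl]
        congr 1
        rw [shapeInner, dedup_append_singleton _ (u', v), if_neg hv, List.filter_append,
          List.map_append]
        have h2 : List.map (fun p => ((p.2 : String), (List.count p (l ++ [(u', v)]) : Int)))
            (List.filter (fun p => p.1 == u') (PySem.List.dedup l))
            = List.map (fun p => (p.2, (List.count p l : Int)))
            (List.filter (fun p => p.1 == u') (PySem.List.dedup l)) := by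
          apply List.map_congr_left
          intro p hp
          have hpx : p ≠ (u', v) := fun he =>
            hv (he ▸ (PySem.List.mem_dedup _ _).mp (List.mem_of_mem_filter hp))
          simp [List.count_append, Ne.symm hpx]
        rw [h2]
        simp [List.count_append, hcnt]
      · rw [if_neg h, shapeInner_ne l (u, v) u' h]
  · have hcu : (shapeDict l).contains (u, v).1 = false := by
      rw [← Bool.not_eq_true]; exact fun hc => hu ((shape_contains l u).mp hc)
    rw [aStep]
    simp only [hcu, Bool.false_eq_true, if_false]
    rw [PySem.Dict.getD_insert_self]
    have hce : (PySem.Dict.empty : PySem.Dict String Int).contains (u, v).2 = false := rfl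
    simp only [hce, Bool.not_false, if_true, reduceIte]
    rw [PySem.Dict.insert_insert_self]
    have hins : PySem.Dict.empty.insert (u, v).2 (1 : Int) = PySem.Dict.mk [(v, 1)] := rfl
    rw [hins]
    apply PySem.Dict.ext
    rw [PySem.Dict.items_insert_of_not_contains _ _ hcu]
    rw [shapeDict, shapeDict, List.map_append, List.map_singleton]
    rw [dedup_append_singleton _ u, if_neg hu, List.map_append, List.map_singleton]
    congr 1
    · apply List.map_congr_left
      intro u' hu'
      have h : u' ≠ u := fun he => hu (he ▸ (PySem.List.mem_dedup _ _).mp hu')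
      rw [shapeInner_ne l (u, v) u' h]
    · congr 2
      rw [shapeInner, dedup_append_singleton _ (u, v),
        if_neg (fun hm => hu (List.mem_map_of_mem (f := (·.1)) hm)), List.filter_append]
      have hnil : (PySem.List.dedup l).filter (fun p => p.1 == u) = [] := by
        rw [List.filter_eq_nil_iff]
        intro p hp hpe
        exact hu (List.mem_map.mpr ⟨p, (PySem.List.mem_dedup _ _).mp hp, by simpa using hpe⟩)
      rw [hnil]
      have hcnt : l.count (u, v) = 0 :=
        List.count_eq_zero.mpr (fun hm => hu (List.mem_map_of_mem (f := (·.1)) hm))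
      simp [List.count_append, hcnt]

theorem getD_mk_map_not {α κ ν : Type} [BEq κ] [LawfulBEq κ] (L : List α) (k : α → κ) (f : α → ν)
    (x : κ) (h : ∀ a ∈ L, k a ≠ x) (d0 : ν) :
    (PySem.Dict.mk (L.map fun a => (k a, f a))).getD x d0 = d0 := by
  apply PySem.Dict.getD_of_not_contains
  rw [← Bool.not_eq_true]
  intro hc
  obtain ⟨a, ha, he⟩ := (contains_mk_map L k f x).mp hc
  exact h a ha he

theorem contains_mk_map_not {α κ ν : Type} [BEq κ] [LawfulBEq κ] (L : List α) (k : α → κ) (f : α → ν)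
    (x : κ) (h : ∀ a ∈ L, k a ≠ x) :
    (PySem.Dict.mk (L.map fun a => (k a, f a))).contains x = false := by
  rw [← Bool.not_eq_true]
  intro hc
  obtain ⟨a, ha, he⟩ := (contains_mk_map L k f x).mp hc
  exact h a ha he

theorem bfold_eq (P : List ((String × String) × Int)) (hnd : (P.map (·.1)).Nodup) :
    P.foldl bStep PySem.Dict.empty
      = PySem.Dict.mk ((PySem.List.dedup (P.map (·.1.1))).map (fun u =>
          (u, PySem.Dict.mk ((P.filter (fun r => r.1.1 == u)).map (fun r => (r.1.2, r.2)))))) := by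
  induction P using List.reverseRecOn with
  | nil => rfl
  | append_singleton P x ih =>
    obtain ⟨⟨u, v⟩, n⟩ := x
    rw [List.map_append] at hnd
    obtain ⟨hndP, -, hdisj⟩ := List.nodup_append.mp hnd
    have hfresh : (u, v) ∉ P.map (·.1) := fun hm => hdisj _ hm ((u, v)) (by simp) rfl
    rw [List.foldl_append, List.foldl_cons, List.foldl_nil, ih hndP]
    rw [bStep, PySem.Dict.modify]
    by_cases hu : u ∈ P.map (·.1.1)
    · have hgd : (PySem.Dict.mk ((PySem.List.dedup (P.map (·.1.1))).map (fun u =>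
          (u, PySem.Dict.mk ((P.filter (fun r => r.1.1 == u)).map (fun r => (r.1.2, r.2))))))).getD
            ((u, v), n).1.1 PySem.Dict.empty
          = PySem.Dict.mk ((P.filter (fun r => r.1.1 == u)).map (fun r => (r.1.2, r.2))) := by
        exact getD_mk_map (PySem.List.dedup (P.map (·.1.1))) (fun w => w) _
          (by simpa using PySem.List.nodup_dedup (P.map (·.1.1))) u
          ((PySem.List.mem_dedup _ _).mpr hu) _
      rw [hgd]
      have hcv : (PySem.Dict.mk ((P.filter (fun r => r.1.1 == u)).map
          (fun r => (r.1.2, r.2)))).contains ((u, v), n).1.2 = false := by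
        apply contains_mk_map_not
        intro r hr he
        have h1 : r.1.1 = u := by simpa using List.of_mem_filter hr
        apply hfresh
        have : r.1 = (u, v) := Prod.ext h1 he
        exact this ▸ List.mem_map_of_mem (List.mem_of_mem_filter hr)
      have hins : (PySem.Dict.mk ((P.filter (fun r => r.1.1 == u)).map
            (fun r => (r.1.2, r.2)))).insert ((u, v), n).1.2 ((u, v), n).2
          = PySem.Dict.mk ((P.filter (fun r => r.1.1 == u)).map (fun r => (r.1.2, r.2)) ++ [(v, n)]) := by
        apply PySem.Dict.ext
        rw [PySem.Dict.items_insert_of_not_contains _ _ hcv]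
      rw [hins]
      have hout : (PySem.Dict.mk ((PySem.List.dedup (P.map (·.1.1))).map (fun u =>
            (u, PySem.Dict.mk ((P.filter (fun r => r.1.1 == u)).map (fun r => (r.1.2, r.2))))))).insert
              ((u, v), n).1.1
              (PySem.Dict.mk ((P.filter (fun r => r.1.1 == u)).map (fun r => (r.1.2, r.2)) ++ [(v, n)]))
          = PySem.Dict.mk ((PySem.List.dedup (P.map (·.1.1))).map (fun u' =>
              (u', if u' = u
                then PySem.Dict.mk ((P.filter (fun r => r.1.1 == u)).map (fun r => (r.1.2, r.2)) ++ [(v, n)])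
                else PySem.Dict.mk ((P.filter (fun r => r.1.1 == u')).map (fun r => (r.1.2, r.2)))))) := by
        exact insert_mk_map (PySem.List.dedup (P.map (·.1.1))) (fun w => w) _
          (by simpa using PySem.List.nodup_dedup (P.map (·.1.1))) u
          ((PySem.List.mem_dedup _ _).mpr hu) _
      rw [hout]
      rw [List.map_append, List.map_singleton, dedup_append_singleton, if_pos (by simpa using hu)]
      congr 1
      apply List.map_congr_left
      intro u' hu'
      by_cases h : u' = u
      · subst h
        rw [if_pos rfl]
        congr 2
        rw [List.filter_append, List.map_append]
        simp
      · rw [if_neg h]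
        congr 2
        rw [List.filter_append]
        simp [beq_eq_false_iff_ne.mpr (fun he : u = u' => h he.symm)]
    · have hgd : (PySem.Dict.mk ((PySem.List.dedup (P.map (·.1.1))).map (fun u =>
          (u, PySem.Dict.mk ((P.filter (fun r => r.1.1 == u)).map (fun r => (r.1.2, r.2))))))).getD
            ((u, v), n).1.1 PySem.Dict.empty = PySem.Dict.empty := by
        apply getD_mk_map_not (k := fun w => w)
        intro a ha he
        exact hu ((show a = u from he) ▸ (PySem.List.mem_dedup _ _).mp ha)
      rw [hgd]
      have hcu : (PySem.Dict.mk ((PySem.List.dedup (P.map (·.1.1))).map (fun u =>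
          (u, PySem.Dict.mk ((P.filter (fun r => r.1.1 == u)).map (fun r => (r.1.2, r.2))))))).contains
            ((u, v), n).1.1 = false := by
        apply contains_mk_map_not (k := fun w => w)
        intro a ha he
        exact hu ((show a = u from he) ▸ (PySem.List.mem_dedup _ _).mp ha)
      apply PySem.Dict.ext
      rw [PySem.Dict.items_insert_of_not_contains _ _ hcu]
      rw [List.map_append, List.map_singleton, dedup_append_singleton, if_neg (by simpa using hu), List.map_append, List.map_singleton]
      congr 1
      · apply List.map_congr_left
        intro u' hu'
        have h : u' ≠ u := fun he => hu (he ▸ (PySem.List.mem_dedup _ _).mp hu')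
        congr 2
        rw [List.filter_append]
        simp [beq_eq_false_iff_ne.mpr (fun he : u = u' => h he.symm)]
      · have hnil : P.filter (fun r => r.1.1 == u) = [] := by
          rw [List.filter_eq_nil_iff]
          intro r hr hre
          exact hu (List.mem_map.mpr ⟨r, hr, by simpa using hre⟩)
        simp [List.filter_append, hnil]
        rfl

theorem dedup_map_dedup {α β : Type} [BEq α] [LawfulBEq α] [BEq β] [LawfulBEq β] (l : List α) (f : α → β) :
    PySem.List.dedup ((PySem.List.dedup l).map f) = PySem.List.dedup (l.map f) := by
  induction l using List.reverseRecOn with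
  | nil => rfl
  | append_singleton l a ih =>
    rw [dedup_append_singleton l a, List.map_append, List.map_singleton, dedup_append_singleton (l.map f) (f a)]
    by_cases h : a ∈ l
    · rw [if_pos h, if_pos (List.mem_map_of_mem h), ih]
    · rw [if_neg h, List.map_append, List.map_singleton, dedup_append_singleton _ (f a), ih]
      by_cases h2 : f a ∈ l.map f
      · rw [if_pos, if_pos h2]
        rw [List.mem_map] at h2 ⊢
        obtain ⟨x, hx, he⟩ := h2
        exact ⟨x, ((PySem.List.mem_dedup _ _)).mpr hx, he⟩
      · rw [if_neg, if_neg h2]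
        rw [List.mem_map] at h2 ⊢
        rintro ⟨x, hx, he⟩
        exact h2 ⟨x, ((PySem.List.mem_dedup _ _)).mp hx, he⟩

theorem bfold_eq_shape (l : List (String × String)) :
    ((PySem.Dict.counter l).items).foldl bStep PySem.Dict.empty = shapeDict l := by
  rw [PySem.Dict.items_counter]
  have hnd : (((PySem.Set.ofList l).map (fun k => (k, (List.count k l : Int)))).map (·.1)).Nodup := by
    rw [List.map_map]
    have hid : ((fun (x : (String × String) × Int) => x.1) ∘ fun k => (k, (List.count k l : Int))) = id := rfl
    rw [hid, List.map_id]
    exact PySem.Set.nodup_ofList l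
  rw [bfold_eq _ hnd]
  rw [shapeDict]
  congr 1
  have hkeys : ((PySem.Set.ofList l).map (fun k => (k, (List.count k l : Int)))).map (·.1.1)
      = (PySem.List.dedup l).map (·.1) := by
    rw [List.map_map]; rfl
  rw [hkeys, dedup_map_dedup]
  apply List.map_congr_left
  intro u hu
  rw [shapeInner]
  congr 2
  rw [List.filter_map, List.map_map]
  rfl

theorem afold_eq_shape (l : List (String × String)) :
    l.foldl aStep PySem.Dict.empty = shapeDict l := by
  induction l using List.reverseRecOn with
  | nil => rfl
  | append_singleton l x ih => rw [List.foldl_append, List.foldl_cons, List.foldl_nil, ih, aStep_shape]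

-- ===== VERDICT (by name: the statement is the Claim_ definition above) =====
theorem user_checked_spec : Claim_equal_user_checked := by
  intro tr _
  show _ = _
  unfold user_checked user_checked_alt
  simp only [afold_eq_shape, PySem.Dict.foldl_insert_getD_add_one_eq_counter, bfold_eq_shape]
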